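-- pv_equiv track=rewrite | github.com/aglahir1/Advent-of-Code | Advent of Code/2021/11.py | energise
-- ===== SOURCE A (Python) =====
-- def energise(i):
--     result = []
--     flashers = []
--     for y in range(len(i)):
--         result.append([])
--         for x in range(len(i[y])):
--             a = i[y][x] + 1
--             if a == 10:
--                 flashers.append([x, y])
--             result[-1].append(a)
--     return [result, flashers]
-- ===== SOURCE B (Python) =====
-- def energise(i):
--     # Recursive decomposition: flashers are found in the ORIGINAL grid as the
--     # cells equal to 9 (they will reach 10 after the +1), independently of the
--     # incremented grid, and both parts are built by structural recursion on rows.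
--     def flash_positions(rows, y):
--         if not rows:
--             return []
--         here = [[x, y] for x in range(len(rows[0])) if rows[0][x] == 9]
--         return here + flash_positions(rows[1:], y + 1)
--
--     def bump(rows):
--         if not rows:
--             return []
--         return [[c + 1 for c in rows[0]]] + bump(rows[1:])
--
--     return [bump(i), flash_positions(i, 0)]
-- ===== Notes on version B (the rewrite author's own statement) =====
-- stated objective: alternative
-- what changed: Replaces A's single fused index-loop threading two accumulators with two independent structural recursions on the rows: one builds the incremented grid, the other finds flashers directly in the original grid as the cells equal to 9 (detected before any increment), so the flasher scan never looks at the result grid.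
import Mathlib
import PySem

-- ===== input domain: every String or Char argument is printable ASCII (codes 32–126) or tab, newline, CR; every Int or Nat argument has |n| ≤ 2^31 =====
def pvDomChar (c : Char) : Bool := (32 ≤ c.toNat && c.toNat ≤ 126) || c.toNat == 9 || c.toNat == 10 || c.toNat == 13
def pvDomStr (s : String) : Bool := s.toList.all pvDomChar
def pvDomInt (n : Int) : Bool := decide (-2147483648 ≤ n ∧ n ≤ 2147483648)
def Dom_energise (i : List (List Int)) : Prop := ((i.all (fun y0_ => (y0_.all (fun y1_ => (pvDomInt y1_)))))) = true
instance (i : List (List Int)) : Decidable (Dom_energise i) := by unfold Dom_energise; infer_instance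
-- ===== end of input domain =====

-- B replaces A's fused two-accumulator loop by two independent structural recursions on rows
-- (increment the grid; find flashers in the ORIGINAL grid as the cells equal to 9); objective: alternative.

-- ===== PORT A =====
-- A's fused loop: for each row append a fresh row to result, and for each cell
-- append the incremented value, recording [x, y] in flashers when it equals 10.
def energise (i : List (List Int)) : List (List (List Int)) :=
  let st := (PySem.List.enumerate i).foldl
    (fun (st : List (List Int) × List (List Int)) (py : Int × List Int) =>
      let inner := (PySem.List.enumerate py.2).foldl
        (fun (st2 : List Int × List (List Int)) (px : Int × Int) =>
          let a := px.2 + 1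
          (st2.1 ++ [a], if a == 10 then st2.2 ++ [[px.1, py.1]] else st2.2))
        ([], st.2)
      (st.1 ++ [inner.1], inner.2))
    ([], [])
  [st.1, st.2]

-- ===== PORT B =====
-- B's recursion on rows finding the cells equal to 9 in the original grid.
def pvFlashPositions : List (List Int) → Int → List (List Int)
  | [], _ => []
  | row :: rest, y =>
      ((PySem.List.enumerate row).filterMap
        (fun (px : Int × Int) => if px.2 == 9 then some [px.1, y] else none))
      ++ pvFlashPositions rest (y + 1)

-- B's recursion on rows building the incremented grid.
def pvBump : List (List Int) → List (List Int)
  | [] => []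
  | row :: rest => row.map (· + 1) :: pvBump rest

def energise_alt (i : List (List Int)) : List (List (List Int)) :=
  [pvBump i, pvFlashPositions i 0]

-- ===== PRECONDITION & SPEC =====
def Spec_energise (i : List (List Int)) (out : List (List (List Int))) : Prop := out = energise_alt i
instance (i : List (List Int)) (out : List (List (List Int))) : Decidable (Spec_energise i out) := by unfold Spec_energise; infer_instance

-- ===== CLAIM (what is proved, stated in full; the proofs are below) =====
def Claim_equal_energise : Prop := ∀ (i : List (List Int)), Dom_energise i → Spec_energise i (energise i)

-- ===== LEMMAS AND PROOFS =====

-- the flashers of one row, as B computes them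
def pvFlashRow (y : Int) (row : List (Int × Int)) : List (List Int) :=
  row.filterMap (fun px => if px.2 = 9 then some [px.1, y] else none)

-- A's inner loop produces the incremented row and appends this row's flashers
theorem pv_inner (y : Int) (row : List Int) :
    ∀ (s : Int) (acc : List Int) (fl : List (List Int)),
    (PySem.List.enumerate row s).foldl
      (fun (st2 : List Int × List (List Int)) (px : Int × Int) =>
        (st2.1 ++ [px.2 + 1], if px.2 + 1 = 10 then st2.2 ++ [[px.1, y]] else st2.2))
      (acc, fl)
    = (acc ++ row.map (· + 1), fl ++ pvFlashRow y (PySem.List.enumerate row s)) := by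
  induction row with
  | nil => intro s acc fl; simp [PySem.List.enumerate_nil, pvFlashRow]
  | cons c cs ih =>
      intro s acc fl
      simp only [List.map_cons, PySem.List.enumerate_cons, List.foldl_cons, pvFlashRow,
        List.filterMap_cons]
      have h910 : c + 1 = 10 ↔ c = 9 := by omega
      by_cases h : c = 9
      · simp only [if_pos (h910.mpr h), if_pos h]
        rw [ih]
        simp [pvFlashRow]
      · simp only [if_neg (fun hh => h (h910.mp hh)), if_neg h]
        rw [ih]
        simp [pvFlashRow]

-- A's outer loop produces the mapped grid and the concatenated flashers
theorem pv_outer (i : List (List Int)) :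
    ∀ (s : Int) (r : List (List Int)) (fl : List (List Int)),
    (PySem.List.enumerate i s).foldl
      (fun (st : List (List Int) × List (List Int)) (py : Int × List Int) =>
        let inner := (PySem.List.enumerate py.2).foldl
          (fun (st2 : List Int × List (List Int)) (px : Int × Int) =>
            (st2.1 ++ [px.2 + 1], if px.2 + 1 = 10 then st2.2 ++ [[px.1, py.1]] else st2.2))
          ([], st.2)
        (st.1 ++ [inner.1], inner.2))
      (r, fl)
    = (r ++ pvBump i, fl ++ pvFlashPositions i s) := by
  induction i with
  | nil => intro s r fl; simp [PySem.List.enumerate_nil, pvBump, pvFlashPositions]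
  | cons row rows ih =>
      intro s r fl
      simp only [PySem.List.enumerate_cons, List.foldl_cons, pvBump, pvFlashPositions]
      rw [pv_inner, ih]
      simp [pvFlashRow]

-- ===== VERDICT (by name: the statement is the Claim_ definition above) =====
theorem energise_spec : Claim_equal_energise := by
  intro i _
  unfold Spec_energise energise energise_alt
  simp only [beq_iff_eq]
  rw [pv_outer]
  simp
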